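-- pv_equiv track=rewrite | github.com/KalinKrastev313/Everyday-Exercises | Big exercises/Miscellaneous/super_functional_strings/super_functional_strings.py | superFunctionalStrings
-- ===== SOURCE A (Python) =====
-- def create_substrings(s):
--     sub_strings = []
--
--     for i in range(len(s)):
--         for l in range(len(s), i, -1):
--             if not s[i:l] in sub_strings:
--                 sub_strings.append(s[i:l])
--     return sub_strings
--
-- def distinct(text):
--     dist = []
--     for char in text:
--         #for really long strings containing the whole alphabet
--         if len(dist) == 26:
--             break
--         #adding unique characters
--         if not char in dist:
--             dist.append(char)
--     return len(dist)
--
-- def superFunctionalStrings(s):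
--     sub_strings = create_substrings(s)
--     result = 0
--     divisor = (10 ** 9 + 7)
--     for text in sub_strings:
--         f = (len(text) ** distinct(text)) % divisor
--         result += f
--     return result
-- ===== SOURCE B (Python) =====
-- def superFunctionalStrings(s):
--     # One pass over all (start, end) pairs: a hash set dedupes substrings and the
--     # distinct-character count is maintained incrementally per start index.
--     MOD = 10 ** 9 + 7
--     n = len(s)
--     seen = set()
--     total = 0
--     for i in range(n):
--         chars = set()
--         for j in range(i + 1, n + 1):
--             chars.add(s[j - 1])
--             sub = s[i:j]
--             if sub not in seen:
--                 seen.add(sub)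
--                 total += (j - i) ** min(len(chars), 26) % MOD
--     return total
-- ===== Notes on version B (the rewrite author's own statement) =====
-- stated objective: faster
-- what changed: Replaces the build-a-list-of-all-substrings-with-linear-membership-scans plus a per-substring distinct-count rescan by a single nested index pass that dedupes substrings in a hash set and maintains each start's distinct-character count incrementally.
import Mathlib
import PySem

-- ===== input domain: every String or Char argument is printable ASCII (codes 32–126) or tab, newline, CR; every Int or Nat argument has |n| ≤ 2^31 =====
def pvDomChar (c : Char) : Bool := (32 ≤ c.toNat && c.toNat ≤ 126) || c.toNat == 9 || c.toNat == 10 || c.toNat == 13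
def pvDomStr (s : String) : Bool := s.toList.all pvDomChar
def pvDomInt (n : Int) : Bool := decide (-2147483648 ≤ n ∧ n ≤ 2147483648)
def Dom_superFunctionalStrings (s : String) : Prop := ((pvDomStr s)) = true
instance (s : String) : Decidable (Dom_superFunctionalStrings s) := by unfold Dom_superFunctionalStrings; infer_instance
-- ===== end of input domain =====

-- B replaces A's list-of-all-substrings with linear membership scans (and a per-substring
-- distinct-count rescan) by one nested index pass that dedupes substrings in a set and
-- maintains each start's distinct-character count incrementally; measurably faster.

-- ===== PORT A =====
-- strings are handled through their character lists (PySem convention)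

-- create_substrings: for i in range(len(s)): for l in range(len(s), i, -1): dedup-append s[i:l]
def createSubstrings (tl : List Char) : List (List Char) :=
  (PySem.List.pyRange 0 tl.length 1).foldl (fun acc i =>
    (PySem.List.pyRange tl.length i (-1)).foldl (fun acc l =>
      let sub := PySem.List.slice tl (some i) (some l)
      if sub ∈ acc then acc else acc ++ [sub]) acc) []

-- distinct(text): scan chars, collect unseen ones, break once 26 are collected
def goDist : List Char → List Char → List Char
  | dist, [] => dist
  | dist, c :: cs =>
      if dist.length = 26 then dist
      else goDist (if c ∈ dist then dist else dist ++ [c]) cs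

def superFunctionalStrings (s : String) : Int :=
  (createSubstrings s.toList).foldl
    (fun result text =>
      result + ((text.length : Int) ^ (goDist [] text).length % 1000000007)) 0

-- ===== PORT B =====
def superFunctionalStrings_alt (s : String) : Int :=
  let tl := s.toList
  let n : Int := tl.length
  let st :=
    (PySem.List.pyRange 0 n 1).foldl (fun (st : List (List Char) × Int) i =>
      let inner :=
        (PySem.List.pyRange (i + 1) (n + 1) 1).foldl
          (fun (st2 : List Char × List (List Char) × Int) j =>
            -- s[j-1] is always in range here; pyGetD with a dummy default is exact
            let chars := PySem.Set.add st2.1 (PySem.List.pyGetD tl (j - 1) ' ')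
            let sub := PySem.List.slice tl (some i) (some j)
            if sub ∈ st2.2.1 then (chars, st2.2.1, st2.2.2)
            else (chars, PySem.Set.add st2.2.1 sub,
                  st2.2.2 + (j - i) ^ min chars.length 26 % 1000000007))
          (([] : List Char), st.1, st.2)
      (inner.2.1, inner.2.2))
      (([] : List (List Char)), (0 : Int))
  st.2

-- ===== PRECONDITION & SPEC =====
def Spec_superFunctionalStrings (s : String) (out : Int) : Prop := out = superFunctionalStrings_alt s
instance (s : String) (out : Int) : Decidable (Spec_superFunctionalStrings s out) := by unfold Spec_superFunctionalStrings; infer_instance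

-- ===== CLAIM (what is proved, stated in full; the proofs are below) =====
def Claim_equal_superFunctionalStrings : Prop := ∀ (s : String), Dom_superFunctionalStrings s → Spec_superFunctionalStrings s (superFunctionalStrings s)

-- ===== LEMMAS AND PROOFS =====

-- the per-substring contribution both programs add, as a function of the substring
def fVal (t : List Char) : Int :=
  (t.length : Int) ^ min (PySem.Set.ofList t).length 26 % 1000000007

-- the deduplicating summation loop both programs perform, over a stream of substrings
def procB (st : List (List Char) × Int) (E : List (List Char)) : List (List Char) × Int :=
  E.foldl (fun st sub => if sub ∈ st.1 then st else (st.1 ++ [sub], st.2 + fVal sub)) st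

-- the substrings B's inner loop at start a visits, in order (lengths 1..k)
def subsFn (tl : List Char) (a k : Nat) : List (List Char) :=
  (List.range k).map (fun t => (tl.drop a).take (t + 1))

-- the enumeration orders of the two programs
def enumA (tl : List Char) : List (List Char) :=
  (PySem.List.pyRange 0 tl.length 1).flatMap (fun i =>
    (PySem.List.pyRange tl.length i (-1)).map (fun l => PySem.List.slice tl (some i) (some l)))

def enumB (tl : List Char) : List (List Char) :=
  (PySem.List.pyRange 0 tl.length 1).flatMap (fun i => subsFn tl i.toNat (tl.length - i.toNat))

-- A's distinct(text) = min(#distinct chars, 26)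
theorem goDist_len (t dist : List Char) (h : dist.length ≤ 26) :
    (goDist dist t).length = min (PySem.Set.update dist t).length 26 := by
  induction t generalizing dist with
  | nil => simp [goDist, PySem.Set.update_nil]; omega
  | cons c cs ih =>
    rw [goDist, PySem.Set.update_cons]
    by_cases h26 : dist.length = 26
    · rw [if_pos h26, PySem.Set.update_eq_append_filter, PySem.Set.add_eq_ite]
      split_ifs <;> simp only [List.length_append, List.length_cons] <;> omega
    · rw [if_neg h26, ← PySem.Set.add_eq_ite]
      apply ih
      rw [PySem.Set.add_eq_ite]
      split_ifs with hm
      · exact h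
      · simp only [List.length_append, List.length_singleton]; omega

-- procB's running total is the sum of fVal over the newly seen substrings
theorem procB_spec (E : List (List Char)) (seen : List (List Char)) (total : Int) :
    procB (seen, total) E =
      (PySem.Set.update seen E,
       total + (((PySem.Set.update seen E).drop seen.length).map fVal).sum) := by
  induction E generalizing seen total with
  | nil => simp [procB, PySem.Set.update_nil, List.drop_length]
  | cons x E' ih =>
    rw [PySem.Set.update_cons]
    by_cases hm : x ∈ seen
    · rw [PySem.Set.add_of_mem hm]
      simpa [procB, hm] using ih seen total
    · rw [PySem.Set.add_of_not_mem hm]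
      have := ih (seen ++ [x]) (total + fVal x)
      simp only [procB, List.foldl_cons, if_neg hm] at *
      rw [this]
      have hsplit : PySem.Set.update (seen ++ [x]) E' = (seen ++ [x]) ++
          (PySem.Set.ofList E').filter (fun y => !(PySem.Set.contains (seen ++ [x]) y)) :=
        PySem.Set.update_eq_append_filter _ _
      rw [Prod.mk.injEq]
      refine ⟨rfl, ?_⟩
      have h1 : List.drop (seen ++ [x]).length (PySem.Set.update (seen ++ [x]) E')
          = (PySem.Set.ofList E').filter (fun y => !(PySem.Set.contains (seen ++ [x]) y)) := by
        rw [hsplit, List.drop_left]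
      have h2 : List.drop seen.length (PySem.Set.update (seen ++ [x]) E')
          = [x] ++ (PySem.Set.ofList E').filter (fun y => !(PySem.Set.contains (seen ++ [x]) y)) := by
        rw [hsplit, List.append_assoc, List.drop_left]
      rw [h1, h2]
      simp only [List.map_append, List.map_cons, List.map_nil, List.sum_append, List.sum_cons,
        List.sum_nil]
      ring

-- B's inner loop at start a, run for k steps, in terms of procB
theorem inner_spec (tl : List Char) (a : Nat) (k : Nat) (seen : List (List Char)) (total : Int)
    (hk : a + k ≤ tl.length) :
    (PySem.List.pyRange ((a : Int) + 1) ((a : Int) + k + 1) 1).foldl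
      (fun (st2 : List Char × List (List Char) × Int) j =>
        let chars := PySem.Set.add st2.1 (PySem.List.pyGetD tl (j - 1) ' ')
        let sub := PySem.List.slice tl (some (a : Int)) (some j)
        if sub ∈ st2.2.1 then (chars, st2.2.1, st2.2.2)
        else (chars, PySem.Set.add st2.2.1 sub,
              st2.2.2 + (j - (a : Int)) ^ min chars.length 26 % 1000000007))
      (([] : List Char), seen, total)
    = (PySem.Set.ofList ((tl.drop a).take k),
       (procB (seen, total) (subsFn tl a k)).1,
       (procB (seen, total) (subsFn tl a k)).2) := by
  induction k with
  | zero =>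
    simp only [Nat.cast_zero, add_zero]
    rw [PySem.List.pyRange_one_eq_nil (le_refl _)]
    simp [procB, subsFn, PySem.Set.ofList_nil]
  | succ k ih =>
    have hk' : a + k ≤ tl.length := by omega
    have hak : a + k < tl.length := by omega
    have hsplit : PySem.List.pyRange ((a : Int) + 1) ((a : Int) + (k + 1) + 1) 1
        = PySem.List.pyRange ((a : Int) + 1) ((a : Int) + k + 1) 1 ++ [(a : Int) + k + 1] := by
      rw [show ((a : Int) + (k + 1) + 1) = ((a : Int) + k + 1) + 1 by ring]
      exact PySem.List.pyRange_one_succ_right (by omega)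
    simp only [Nat.cast_add, Nat.cast_one] at *
    rw [hsplit, List.foldl_append, ih hk']
    simp only [List.foldl_cons, List.foldl_nil]
    -- the single step at j = a + k + 1
    have hc : PySem.List.pyGetD tl ((a : Int) + k + 1 - 1) ' ' = tl[a + k]'hak := by
      rw [show ((a : Int) + k + 1 - 1) = ((a + k : Nat) : Int) by push_cast; ring,
          PySem.List.pyGetD_natCast]
      exact List.getD_eq_getElem _ _ hak
    have htake : (tl.drop a).take (k + 1) = (tl.drop a).take k ++ [tl[a + k]'hak] := by
      rw [List.take_add_one]
      congr 1
      rw [List.getElem?_drop]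
      simp [List.getElem?_eq_getElem (by omega : a + k < tl.length)]
    have hsub : PySem.List.slice tl (some (a : Int)) (some ((a : Int) + k + 1))
        = (tl.drop a).take (k + 1) := by
      rw [show ((a : Int) + k + 1) = ((a + k + 1 : Nat) : Int) by push_cast; ring,
          PySem.List.slice_natCast]
      congr 1
      omega
    have hchars : PySem.Set.add (PySem.Set.ofList ((tl.drop a).take k)) (tl[a + k]'hak)
        = PySem.Set.ofList ((tl.drop a).take (k + 1)) := by
      rw [htake, PySem.Set.ofList_append_singleton]
    have hsubs : subsFn tl a (k + 1) = subsFn tl a k ++ [(tl.drop a).take (k + 1)] := by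
      simp [subsFn, List.range_succ]
    have hlen : ((tl.drop a).take (k + 1)).length = k + 1 := by
      simp; omega
    rw [hc, hchars, hsub, hsubs]
    have h1 : procB (seen, total) (subsFn tl a k ++ [(tl.drop a).take (k + 1)])
        = (if (tl.drop a).take (k + 1) ∈ (procB (seen, total) (subsFn tl a k)).1
           then procB (seen, total) (subsFn tl a k)
           else ((procB (seen, total) (subsFn tl a k)).1 ++ [(tl.drop a).take (k + 1)],
                 (procB (seen, total) (subsFn tl a k)).2 + fVal ((tl.drop a).take (k + 1)))) := by
      unfold procB
      rw [List.foldl_append]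
      simp only [List.foldl_cons, List.foldl_nil]
    have hfv : fVal ((tl.drop a).take (k + 1))
        = ((a : Int) + k + 1 - a) ^ min (PySem.Set.ofList ((tl.drop a).take (k + 1))).length 26
            % 1000000007 := by
      unfold fVal
      rw [hlen, show ((a : Int) + k + 1 - a) = (((k + 1 : Nat)) : Int) by push_cast; ring]
    rw [h1, hfv]
    by_cases hm : (tl.drop a).take (k + 1) ∈ (procB (seen, total) (subsFn tl a k)).1
    · simp only [if_pos hm]
    · simp only [if_neg hm, Prod.mk.injEq]
      exact ⟨trivial, PySem.Set.add_of_not_mem hm, trivial⟩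

-- a fold of per-start dedup chunks is one dedup of the concatenation
theorem foldl_update_flatMap (l : List Int) (G : Int → List (List Char)) (acc : List (List Char)) :
    l.foldl (fun acc i => PySem.Set.update acc (G i)) acc = PySem.Set.update acc (l.flatMap G) := by
  induction l generalizing acc with
  | nil => simp [PySem.Set.update_nil]
  | cons x xs ih => simp only [List.foldl_cons, List.flatMap_cons, PySem.Set.update_append, ih]

theorem foldl_procB_flatMap (l : List Int) (F : Int → List (List Char))
    (st : List (List Char) × Int) :
    l.foldl (fun st i => procB st (F i)) st = procB st (l.flatMap F) := by
  induction l generalizing st with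
  | nil => simp [procB]
  | cons x xs ih =>
    simp only [List.foldl_cons, List.flatMap_cons, ih]
    unfold procB
    rw [List.foldl_append]

theorem createSubstrings_eq (tl : List Char) :
    createSubstrings tl = PySem.Set.ofList (enumA tl) := by
  have h1 : createSubstrings tl = (PySem.List.pyRange 0 tl.length 1).foldl
      (fun acc i => PySem.Set.update acc ((PySem.List.pyRange tl.length i (-1)).map
        (fun l => PySem.List.slice tl (some i) (some l)))) [] := by
    unfold createSubstrings
    apply PySem.List.foldl_congr_mem
    intro acc i _
    rw [PySem.Set.update_map_eq_foldl_add]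
    apply PySem.List.foldl_congr_mem
    intro acc2 l _
    simp [PySem.Set.add_eq_ite]
  rw [h1, foldl_update_flatMap, PySem.Set.update_nil_left]
  rfl

theorem a_eq (s : String) :
    superFunctionalStrings s = ((PySem.Set.ofList (enumA s.toList)).map fVal).sum := by
  unfold superFunctionalStrings
  rw [createSubstrings_eq, PySem.List.foldl_add]
  rw [List.map_congr_left (fun t _ => by
    show (t.length : Int) ^ (goDist [] t).length % 1000000007 = fVal t
    rw [goDist_len t [] (by simp), PySem.Set.update_nil_left]
    rfl)]
  exact zero_add _

theorem alt_eq (s : String) :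
    superFunctionalStrings_alt s = ((PySem.Set.ofList (enumB s.toList)).map fVal).sum := by
  have h1 : superFunctionalStrings_alt s = ((PySem.List.pyRange 0 s.toList.length 1).foldl
      (fun st i => procB st (subsFn s.toList i.toNat (s.toList.length - i.toNat)))
      (([] : List (List Char)), (0 : Int))).2 := by
    unfold superFunctionalStrings_alt
    refine congrArg Prod.snd ?_
    apply PySem.List.foldl_congr_mem
    intro st i hi
    rw [PySem.List.mem_pyRange_one] at hi
    have ha : ((i.toNat : Nat) : Int) = i := Int.toNat_of_nonneg hi.1
    have hk : i.toNat + (s.toList.length - i.toNat) ≤ s.toList.length := by omega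
    have h2 := inner_spec s.toList i.toNat (s.toList.length - i.toNat) st.1 st.2 hk
    rw [ha] at h2
    rw [show ((i : Int) + ((s.toList.length - i.toNat : Nat) : Int) + 1)
        = ((s.toList.length : Int) + 1) by omega] at h2
    rw [h2]
  rw [h1, foldl_procB_flatMap, procB_spec]
  simp only [PySem.Set.update_nil_left, List.drop_zero]
  rw [zero_add]
  rfl

-- both enumerations visit exactly the nonempty substrings of s
theorem mem_enumA (tl : List Char) (x : List Char) :
    x ∈ enumA tl ↔ ∃ a b : Nat, a < b ∧ b ≤ tl.length ∧ x = (tl.drop a).take (b - a) := by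
  unfold enumA
  simp only [List.mem_flatMap, List.mem_map, PySem.List.mem_pyRange_one,
    PySem.List.mem_pyRange_neg_one]
  constructor
  · rintro ⟨i, ⟨hi0, hin⟩, l, ⟨hl1, hl2⟩, hx⟩
    refine ⟨i.toNat, l.toNat, by omega, by omega, ?_⟩
    have hi' : i = ((i.toNat : Nat) : Int) := by omega
    have hl' : l = ((l.toNat : Nat) : Int) := by omega
    rw [hi', hl'] at hx
    rw [← hx, PySem.List.slice_natCast]
  · rintro ⟨a, b, hab, hb, hx⟩
    refine ⟨(a : Int), ⟨by omega, by omega⟩, (b : Int), ⟨by omega, by omega⟩, ?_⟩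
    rw [PySem.List.slice_natCast, hx]

theorem mem_enumB (tl : List Char) (x : List Char) :
    x ∈ enumB tl ↔ ∃ a b : Nat, a < b ∧ b ≤ tl.length ∧ x = (tl.drop a).take (b - a) := by
  unfold enumB subsFn
  simp only [List.mem_flatMap, List.mem_map, PySem.List.mem_pyRange_one, List.mem_range]
  constructor
  · rintro ⟨i, ⟨hi0, hin⟩, t, ht, hx⟩
    refine ⟨i.toNat, i.toNat + t + 1, by omega, by omega, ?_⟩
    rw [← hx]
    congr 1
    omega
  · rintro ⟨a, b, hab, hb, hx⟩
    refine ⟨(a : Int), ⟨by omega, by omega⟩, b - a - 1, by omega, ?_⟩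
    rw [hx, Int.toNat_natCast]
    congr 1
    omega

-- ===== VERDICT (by name: the statement is the Claim_ definition above) =====
theorem superFunctionalStrings_spec : Claim_equal_superFunctionalStrings := by
  intro s _
  show superFunctionalStrings s = superFunctionalStrings_alt s
  rw [a_eq, alt_eq]
  have hperm : (PySem.Set.ofList (enumA s.toList)).Perm (PySem.Set.ofList (enumB s.toList)) := by
    rw [List.perm_ext_iff_of_nodup (PySem.Set.nodup_ofList _) (PySem.Set.nodup_ofList _)]
    intro x
    rw [PySem.Set.mem_ofList, PySem.Set.mem_ofList, mem_enumA, mem_enumB]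
  exact List.Perm.sum_eq (hperm.map fVal)
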